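-- pv_equiv track=rewrite | github.com/LeviCrypto99/lts | entry_bot.py | _is_long_market_direction
-- ===== SOURCE A (Python) =====
-- _LONG_DIRECTION_ALIASES = {"롱", "long", "매수", "상방"}
--
-- def _normalize_market_direction_token(value: str) -> str:
--     return "".join(str(value or "").strip().lower().split())
--
-- def _is_long_market_direction(value: str) -> bool:
--     normalized = _normalize_market_direction_token(value)
--     if not normalized:
--         return False
--     for alias in _LONG_DIRECTION_ALIASES:
--         if normalized == alias or normalized.startswith(alias):
--             return True
--     return False
-- ===== SOURCE B (Python) =====
-- _LONG_DIRECTION_ALIASES = {"롱", "long", "매수", "상방"}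
--
-- _MAX_ALIAS_LEN = max(len(alias) for alias in _LONG_DIRECTION_ALIASES)
--
-- def _normalize_market_direction_token(value: str) -> str:
--     return "".join(str(value or "").strip().lower().split())
--
-- def _is_long_market_direction(value: str) -> bool:
--     normalized = _normalize_market_direction_token(value)
--     for i in range(1, min(len(normalized), _MAX_ALIAS_LEN) + 1):
--         if normalized[:i] in _LONG_DIRECTION_ALIASES:
--             return True
--     return False
-- ===== Notes on version B (the rewrite author's own statement) =====
-- stated objective: idiomatic
-- what changed: B iterates over the (length-capped) prefixes of the normalized token and tests each by set membership, instead of A's scan over the alias set with equality/startswith checks per alias.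
import Mathlib
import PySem

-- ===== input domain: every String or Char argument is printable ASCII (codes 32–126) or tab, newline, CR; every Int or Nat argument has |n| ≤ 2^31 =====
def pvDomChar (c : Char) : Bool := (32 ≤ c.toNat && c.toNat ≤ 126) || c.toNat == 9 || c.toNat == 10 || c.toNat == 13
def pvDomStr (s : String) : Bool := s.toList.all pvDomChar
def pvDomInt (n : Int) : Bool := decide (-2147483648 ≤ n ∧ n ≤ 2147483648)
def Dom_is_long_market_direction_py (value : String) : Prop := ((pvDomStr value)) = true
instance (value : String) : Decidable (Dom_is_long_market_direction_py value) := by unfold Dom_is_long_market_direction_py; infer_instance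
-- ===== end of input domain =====

-- B replaces A's scan over the alias set (equality/startswith per alias) by a loop over the
-- prefixes of the normalized token with a set-membership test per prefix; objective: idiomatic.

-- ===== PORT A =====
-- module constant _LONG_DIRECTION_ALIASES (shared by both Pythons)
def pvAliases : List (List Char) := ["롱".toList, "long".toList, "매수".toList, "상방".toList]

-- helper _normalize_market_direction_token: "".join(value.strip().lower().split())
def pvNormalize (value : String) : List Char :=
  PySem.Chars.join [] (PySem.Chars.split₀ (PySem.Chars.lower (PySem.Chars.strip value.toList)))

def is_long_market_direction_py (value : String) : Bool :=
  let normalized := pvNormalize value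
  if normalized = [] then false
  else pvAliases.any (fun a => normalized == a || PySem.Chars.startswith normalized a)

-- ===== PORT B =====
def pvAliasSet : PySem.Set (List Char) := PySem.Set.ofList pvAliases

-- module constant _MAX_ALIAS_LEN = max(len(alias) for alias in _LONG_DIRECTION_ALIASES)
def pvMaxAliasLen : Int := PySem.List.maxD (pvAliases.map PySem.Chars.len) (fun x => x) 0

def is_long_market_direction_py_alt (value : String) : Bool :=
  let normalized := pvNormalize value
  (PySem.List.pyRange 1 (min (PySem.Chars.len normalized) pvMaxAliasLen + 1) 1).any
    (fun i => PySem.Set.contains pvAliasSet (PySem.Chars.slice normalized none (some i)))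

-- ===== PRECONDITION & SPEC =====
def Spec_is_long_market_direction_py (value : String) (out : Bool) : Prop := out = is_long_market_direction_py_alt value
instance (value : String) (out : Bool) : Decidable (Spec_is_long_market_direction_py value out) := by unfold Spec_is_long_market_direction_py; infer_instance

-- ===== CLAIM (what is proved, stated in full; the proofs are below) =====
def Claim_equal_is_long_market_direction_py : Prop := ∀ (value : String), Dom_is_long_market_direction_py value → Spec_is_long_market_direction_py value (is_long_market_direction_py value)

-- ===== LEMMAS AND PROOFS =====

-- core: for any normalized token n, A's alias scan equals B's prefix scan
theorem pvKey (n : List Char) :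
    (if n = [] then false
     else pvAliases.any (fun a => n == a || PySem.Chars.startswith n a))
    = (PySem.List.pyRange 1 (min (PySem.Chars.len n) pvMaxAliasLen + 1) 1).any
        (fun i => PySem.Set.contains pvAliasSet (PySem.Chars.slice n none (some i))) := by
  rw [Bool.eq_iff_iff]
  split_ifs with hn
  · subst hn
    decide
  · simp only [List.any_eq_true, Bool.or_eq_true, beq_iff_eq,
      PySem.Chars.startswith_iff, PySem.List.mem_pyRange_one,
      PySem.Chars.slice_eq_listSlice, PySem.Set.contains, pvAliasSet,
      PySem.Set.mem_ofList, List.contains_iff_mem, PySem.Chars.len_eq]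
    constructor
    · rintro ⟨a, ha, hcase⟩
      have hpre : a <+: n := by
        rcases hcase with h | h
        · exact h ▸ List.prefix_refl a
        · exact h
      have hane : a ≠ [] := by
        fin_cases ha <;> simp
      have hlen : a.length ≤ n.length := hpre.length_le
      refine ⟨(a.length : Int), ⟨?_, ?_⟩, ?_⟩
      · have : 1 ≤ a.length := Nat.one_le_iff_ne_zero.mpr (by simpa using hane)
        exact_mod_cast this
      · have hM : (a.length : Int) ≤ pvMaxAliasLen := by fin_cases ha <;> decide
        have : (a.length : Int) ≤ (n.length : Int) := by exact_mod_cast hlen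
        omega
      · rw [PySem.List.slice_to n (Int.natCast_nonneg a.length)]
        rw [Int.toNat_natCast, ← List.prefix_iff_eq_take.mp hpre]
        exact ha
    · rintro ⟨i, ⟨h1, h2⟩, hc⟩
      rw [PySem.List.slice_to n (le_trans zero_le_one h1)] at hc
      exact ⟨n.take i.toNat, hc, Or.inr (List.take_prefix _ n)⟩

-- ===== VERDICT (by name: the statement is the Claim_ definition above) =====
theorem is_long_market_direction_py_spec : Claim_equal_is_long_market_direction_py := by
  intro value _
  unfold Spec_is_long_market_direction_py is_long_market_direction_py is_long_market_direction_py_alt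
  exact pvKey (pvNormalize value)
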